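-- pv_equiv track=rewrite | github.com/Neerajpandey2/rag-based-AiChatbot | RAG-Qdrant-ChatAI-backend/helpers/pdf_helper.py | chunk_pdf_text
-- ===== SOURCE A (Python) =====
-- def chunk_pdf_text(full_text):
--     """Split text into chunks by headings (fallback: entire doc)."""
--     lines = full_text.splitlines()
--     chunks, current_content = [], []
--     current_heading, found_heading = None, False
--
--     for line in lines:
--         line = line.strip()
--         if (line.isupper() and len(line) > 3) or line.endswith(":") or (len(line) > 20 and line == line.title()):
--             found_heading = True
--             if current_content and current_heading:
--                 chunks.append({"heading": current_heading, "text": "\n".join(current_content)})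
--             current_heading, current_content = line, []
--         else:
--             current_content.append(line)
--
--     if current_content and current_heading:
--         chunks.append({"heading": current_heading, "text": "\n".join(current_content)})
--
--     if not found_heading and full_text.strip():
--         chunks = [{"heading": "Document", "text": full_text.strip()}]
--
--     return chunks
-- ===== SOURCE B (Python) =====
-- def chunk_pdf_text(full_text):
--     """Split text into chunks by headings (fallback: entire doc).
--
--     Different decomposition: strip all lines up front, drop the pre-heading
--     prefix, then recursively take heading + span-until-next-heading groups.
--     """
--     def is_heading(line):
--         return (line.isupper() and len(line) > 3) or line.endswith(":") or (len(line) > 20 and line == line.title())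
--
--     def group(heading, rest):
--         body = []
--         while rest and not is_heading(rest[0]):
--             body.append(rest[0])
--             rest = rest[1:]
--         out = [{"heading": heading, "text": "\n".join(body)}] if body else []
--         if rest:
--             return out + group(rest[0], rest[1:])
--         return out
--
--     stripped = [ln.strip() for ln in full_text.splitlines()]
--     rest = stripped
--     while rest and not is_heading(rest[0]):
--         rest = rest[1:]
--     if not rest:
--         s = full_text.strip()
--         return [{"heading": "Document", "text": s}] if s else []
--     return group(rest[0], rest[1:])
-- ===== Notes on version B (the rewrite author's own statement) =====
-- stated objective: alternative
-- what changed: A threads one stateful fold (chunks, current_content, current_heading, found_heading) over the lines; B strips all lines up front, drops the pre-heading prefix, and recursively emits heading + span-until-next-heading groups with no accumulator state.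
import Mathlib
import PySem

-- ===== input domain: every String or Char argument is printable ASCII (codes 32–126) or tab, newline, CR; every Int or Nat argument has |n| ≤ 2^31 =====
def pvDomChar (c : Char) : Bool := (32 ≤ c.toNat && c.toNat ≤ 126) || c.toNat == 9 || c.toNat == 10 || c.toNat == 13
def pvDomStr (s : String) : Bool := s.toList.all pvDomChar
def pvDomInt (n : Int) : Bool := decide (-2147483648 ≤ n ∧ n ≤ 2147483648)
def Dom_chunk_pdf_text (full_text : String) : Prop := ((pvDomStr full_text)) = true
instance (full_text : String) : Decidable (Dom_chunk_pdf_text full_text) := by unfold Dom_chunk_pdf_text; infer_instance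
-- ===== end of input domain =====

-- B restructures A's single stateful accumulator loop into: strip all lines, drop the
-- pre-heading prefix, then recursively emit heading + span-until-next-heading groups
-- (objective: alternative decomposition, same cost).

-- Shared low-level primitives absent from PySem (exact on the printable-ASCII domain):
-- str.isupper(): at least one cased character and no lowercase one (ASCII: cased = letter).
def pvStrIsUpper (cs : List Char) : Bool :=
  cs.any PySem.Chars.isalpha && !cs.any PySem.Chars.islower
-- str.title(): uppercase a letter after a non-letter, lowercase a letter after a letter (exact on ASCII).
def pvTitleGo (prevAlpha : Bool) : List Char → List Char
  | [] => []
  | c :: rest =>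
    if PySem.Chars.isalpha c then
      (if prevAlpha then PySem.Chars.lowerChar c else PySem.Chars.upperChar c) :: pvTitleGo true rest
    else c :: pvTitleGo false rest
-- the heading test both Pythons perform (A inline, B as its is_heading helper)
def pvIsHeading (l : String) : Bool :=
  (pvStrIsUpper l.toList && decide (3 < l.toList.length)) || PySem.Str.endswith l ":"
    || (decide (20 < l.toList.length) && (l.toList == pvTitleGo false l.toList))

-- ===== PORT A =====
-- 'if current_content and current_heading: chunks.append({...})'
def pvEmitA (chunks : List (List (String × String))) (cc : List String) (ch : Option String) :
    List (List (String × String)) :=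
  match cc, ch with
  | _ :: _, some h => chunks ++ [[("heading", h), ("text", PySem.Str.join "\n" cc)]]
  | _, _ => chunks

-- the body of A's for-loop; state = (chunks, current_content, current_heading, found_heading)
def pvStepA (st : List (List (String × String)) × List String × Option String × Bool)
    (line : String) : List (List (String × String)) × List String × Option String × Bool :=
  let l := PySem.Str.strip line
  if pvIsHeading l then
    (pvEmitA st.1 st.2.1 st.2.2.1, [], some l, true)
  else
    (st.1, st.2.1 ++ [l], st.2.2.1, st.2.2.2)

def chunk_pdf_text (full_text : String) : List (List (String × String)) :=
  match (PySem.Str.splitlines full_text).foldl pvStepA ([], [], none, false) with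
  | (chunks, cc, ch, fh) =>
    if fh = false ∧ PySem.Str.strip full_text ≠ "" then
      [[("heading", "Document"), ("text", PySem.Str.strip full_text)]]
    else pvEmitA chunks cc ch

-- ===== PORT B =====
-- B's inner while loop: split 'rest' into (lines before the next heading, rest from that heading)
def pvSpanB : List String → List String × List String
  | [] => ([], [])
  | x :: xs =>
    if pvIsHeading x then ([], x :: xs)
    else (x :: (pvSpanB xs).1, (pvSpanB xs).2)

theorem pvSpanB_snd_length_le (rest : List String) : (pvSpanB rest).2.length ≤ rest.length := by
  induction rest with
  | nil => simp [pvSpanB]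
  | cons x xs ih =>
    simp only [pvSpanB]
    split
    · simp
    · simpa using Nat.le_succ_of_le ih

def pvGroupB (heading : String) (rest : List String) : List (List (String × String)) :=
  let body := (pvSpanB rest).1
  let out := if body ≠ [] then [[("heading", heading), ("text", PySem.Str.join "\n" body)]] else []
  match hsp : (pvSpanB rest).2 with
  | [] => out
  | h2 :: t2 => out ++ pvGroupB h2 t2
termination_by rest.length
decreasing_by
  have h1 := pvSpanB_snd_length_le rest
  rw [hsp] at h1
  simp at h1
  omega

def chunk_pdf_text_alt (full_text : String) : List (List (String × String)) :=
  match ((PySem.Str.splitlines full_text).map PySem.Str.strip).dropWhile (fun l => !pvIsHeading l) with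
  | [] =>
    if PySem.Str.strip full_text ≠ "" then
      [[("heading", "Document"), ("text", PySem.Str.strip full_text)]]
    else []
  | h :: t => pvGroupB h t

-- ===== PRECONDITION & SPEC =====
def Spec_chunk_pdf_text (full_text : String) (out : List (List (String × String))) : Prop := out = chunk_pdf_text_alt full_text
instance (full_text : String) (out : List (List (String × String))) : Decidable (Spec_chunk_pdf_text full_text out) := by unfold Spec_chunk_pdf_text; infer_instance

-- ===== CLAIM (what is proved, stated in full; the proofs are below) =====
def Claim_equal_chunk_pdf_text : Prop := ∀ (full_text : String), Dom_chunk_pdf_text full_text → Spec_chunk_pdf_text full_text (chunk_pdf_text full_text)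

-- ===== LEMMAS AND PROOFS =====

-- the chunk emitted for heading h with body lines 'body' (empty body emits nothing)
def pvChunkOf (h : String) (body : List String) : List (List (String × String)) :=
  if body ≠ [] then [[("heading", h), ("text", PySem.Str.join "\n" body)]] else []

def pvTailB : List String → List (List (String × String))
  | [] => []
  | h :: t => pvGroupB h t

-- A's step on an already-stripped line
def pvStepS (st : List (List (String × String)) × List String × Option String × Bool)
    (l : String) : List (List (String × String)) × List String × Option String × Bool :=
  if pvIsHeading l then (pvEmitA st.1 st.2.1 st.2.2.1, [], some l, true)
  else (st.1, st.2.1 ++ [l], st.2.2.1, st.2.2.2)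

theorem pvFoldA_eq (lines : List String)
    (init : List (List (String × String)) × List String × Option String × Bool) :
    lines.foldl pvStepA init = (lines.map PySem.Str.strip).foldl pvStepS init := by
  rw [List.foldl_map]
  rfl

theorem pvEmitA_none (c : List (List (String × String))) (cc : List String) :
    pvEmitA c cc none = c := by cases cc <;> rfl

theorem pvEmitA_some (c : List (List (String × String))) (cc : List String) (h : String) :
    pvEmitA c cc (some h) = c ++ pvChunkOf h cc := by
  cases cc <;> simp [pvEmitA, pvChunkOf]

theorem pvSpanB_cons_head (x : String) (xs : List String) (hx : pvIsHeading x = true) :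
    pvSpanB (x :: xs) = ([], x :: xs) := by simp [pvSpanB, hx]

theorem pvSpanB_cons_not (x : String) (xs : List String) (hx : pvIsHeading x = false) :
    pvSpanB (x :: xs) = (x :: (pvSpanB xs).1, (pvSpanB xs).2) := by
  simp [pvSpanB, hx]

theorem pvGroupB_eq (h : String) (rest : List String) :
    pvGroupB h rest = pvChunkOf h (pvSpanB rest).1 ++ pvTailB (pvSpanB rest).2 := by
  rw [pvGroupB]
  cases hsp : pvSpanB rest with
  | mk body rest' =>
    cases rest' <;> simp [pvChunkOf, pvTailB]

theorem pvFold_from_heading (ls : List String) (chunks : List (List (String × String)))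
    (cc : List String) (h : String) :
    pvEmitA (ls.foldl pvStepS (chunks, cc, some h, true)).1
        (ls.foldl pvStepS (chunks, cc, some h, true)).2.1
        (ls.foldl pvStepS (chunks, cc, some h, true)).2.2.1
      = chunks ++ pvChunkOf h (cc ++ (pvSpanB ls).1) ++ pvTailB (pvSpanB ls).2
    ∧ (ls.foldl pvStepS (chunks, cc, some h, true)).2.2.2 = true := by
  induction ls generalizing chunks cc h with
  | nil =>
    simp [pvSpanB, pvTailB, pvEmitA_some]
  | cons x xs ih =>
    by_cases hx : pvIsHeading x = true
    · have hstep : pvStepS (chunks, cc, some h, true) x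
          = (pvEmitA chunks cc (some h), [], some x, true) := by
        simp [pvStepS, hx]
      rw [List.foldl_cons, hstep, pvSpanB_cons_head x xs hx]
      obtain ⟨h1, h2⟩ := ih (pvEmitA chunks cc (some h)) [] x
      refine ⟨?_, h2⟩
      rw [h1, pvEmitA_some]
      simp only [pvTailB]
      rw [pvGroupB_eq]
      simp
      cases (pvSpanB xs).2 <;> simp [pvTailB]
    · have hx' : pvIsHeading x = false := by simpa using hx
      have hstep : pvStepS (chunks, cc, some h, true) x
          = (chunks, cc ++ [x], some h, true) := by
        simp [pvStepS, hx']
      rw [List.foldl_cons, hstep, pvSpanB_cons_not x xs hx']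
      obtain ⟨h1, h2⟩ := ih chunks (cc ++ [x]) h
      refine ⟨?_, h2⟩
      rw [h1]
      simp

theorem pvFold_prefix (ls : List String) (cc : List String) :
    ls.foldl pvStepS (([] : List (List (String × String))), cc, none, false)
      = match ls.dropWhile (fun l => !pvIsHeading l) with
        | [] => ([], cc ++ ls, none, false)
        | h :: t => t.foldl pvStepS ([], [], some h, true) := by
  induction ls generalizing cc with
  | nil => simp
  | cons x xs ih =>
    by_cases hx : pvIsHeading x = true
    · have hstep : pvStepS (([] : List (List (String × String))), cc, none, false) x
          = ([], [], some x, true) := by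
        simp [pvStepS, hx, pvEmitA_none]
      rw [List.foldl_cons, hstep]
      simp [hx]
    · have hx' : pvIsHeading x = false := by simpa using hx
      have hstep : pvStepS (([] : List (List (String × String))), cc, none, false) x
          = ([], cc ++ [x], none, false) := by
        simp [pvStepS, hx']
      rw [List.foldl_cons, hstep, ih (cc ++ [x])]
      simp [hx']

-- ===== VERDICT (by name: the statement is the Claim_ definition above) =====
theorem chunk_pdf_text_spec : Claim_equal_chunk_pdf_text := by
  intro full_text _
  unfold Spec_chunk_pdf_text chunk_pdf_text chunk_pdf_text_alt
  rw [pvFoldA_eq, pvFold_prefix]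
  cases hdw : ((PySem.Str.splitlines full_text).map PySem.Str.strip).dropWhile (fun l => !pvIsHeading l) with
  | nil =>
    simp [pvEmitA_none]
  | cons h t =>
    dsimp only
    obtain ⟨h1, h2⟩ := pvFold_from_heading t [] [] h
    cases hft : t.foldl pvStepS ([], [], some h, true) with
    | mk c rest =>
      obtain ⟨cc, ch, fh⟩ := rest
      rw [hft] at h1 h2
      simp at h1 h2
      subst h2
      simp [h1, pvGroupB_eq]
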